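-- pv_equiv track=rewrite | github.com/neilisagam2/fpl-daily-digest | fpl_deadline_notifier.py | build_fixture_map
-- ===== SOURCE A (Python) =====
-- def build_fixture_map(fixtures, teams_map_short, current_gw_id):
--     """Returns a map of team_id -> list of next 3 fixture strings (Team Name (Difficulty))"""
--     team_fixtures = {t_id: [] for t_id in teams_map_short.keys()}
--
--     # FIX: Filter for all UNPLAYED fixtures, starting from the current Gameweek onwards.
--     # The previous logic incorrectly filtered out the current gameweek's fixtures.
--     relevant_fixtures = sorted([f for f in fixtures if not f.get("finished", False) and f.get("event")], key=lambda x: x["event"])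
--
--     for f in relevant_fixtures:
--         # Determine opponent and difficulty for Home team
--         opp_a = teams_map_short.get(f["team_a"], '?')
--         diff_h = f.get("team_h_difficulty", 3)
--         fixture_h_str = f"{opp_a}({diff_h})"
--
--         # Determine opponent and difficulty for Away team
--         opp_h = teams_map_short.get(f["team_h"], '?')
--         diff_a = f.get("team_a_difficulty", 3)
--         fixture_a_str = f"{opp_h}({diff_a})"
--
--         # Append only if less than 3 fixtures have been added for that team
--         if len(team_fixtures[f["team_h"]]) < 3:
--             team_fixtures[f["team_h"]].append(fixture_h_str)
--         if len(team_fixtures[f["team_a"]]) < 3: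
--             team_fixtures[f["team_a"]].append(fixture_a_str)
--
--     # Convert the list of fixture strings into a single, comma-separated string
--     # e.g., 'WHU(2), SOU(3), ARS(4)'
--     return {team_id: ", ".join(fixtures) for team_id, fixtures in team_fixtures.items()}
-- ===== SOURCE B (Python) =====
-- def build_fixture_map(fixtures, teams_map_short, current_gw_id):
--     """Group-then-sort: one pass collects (event, fixture-string) pairs per team,
--     then each team's list is stably sorted by event and the first 3 are joined."""
--     team_fixtures = {t: [] for t in teams_map_short}
--     for f in fixtures:
--         if f.get("finished", False) or not f.get("event"):
--             continue
--         e = f["event"]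
--         home_str = f"{teams_map_short.get(f['team_a'], '?')}({f.get('team_h_difficulty', 3)})"
--         away_str = f"{teams_map_short.get(f['team_h'], '?')}({f.get('team_a_difficulty', 3)})"
--         team_fixtures[f["team_h"]].append((e, home_str))
--         team_fixtures[f["team_a"]].append((e, away_str))
--     return {t: ", ".join(s for _, s in sorted(lst, key=lambda p: p[0])[:3])
--             for t, lst in team_fixtures.items()}
-- ===== Notes on version B (the rewrite author's own statement) =====
-- stated objective: alternative
-- what changed: A filters, globally sorts all relevant fixtures by event and then fills every team's list in one capped (at 3) accumulating pass over the sorted list; B never sorts globally: a single grouping pass over the fixtures in original order collects (event, fixture-string) pairs per team, and each team's own small list is then stably sorted by event, truncated to 3 and joined.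
import Mathlib
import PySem

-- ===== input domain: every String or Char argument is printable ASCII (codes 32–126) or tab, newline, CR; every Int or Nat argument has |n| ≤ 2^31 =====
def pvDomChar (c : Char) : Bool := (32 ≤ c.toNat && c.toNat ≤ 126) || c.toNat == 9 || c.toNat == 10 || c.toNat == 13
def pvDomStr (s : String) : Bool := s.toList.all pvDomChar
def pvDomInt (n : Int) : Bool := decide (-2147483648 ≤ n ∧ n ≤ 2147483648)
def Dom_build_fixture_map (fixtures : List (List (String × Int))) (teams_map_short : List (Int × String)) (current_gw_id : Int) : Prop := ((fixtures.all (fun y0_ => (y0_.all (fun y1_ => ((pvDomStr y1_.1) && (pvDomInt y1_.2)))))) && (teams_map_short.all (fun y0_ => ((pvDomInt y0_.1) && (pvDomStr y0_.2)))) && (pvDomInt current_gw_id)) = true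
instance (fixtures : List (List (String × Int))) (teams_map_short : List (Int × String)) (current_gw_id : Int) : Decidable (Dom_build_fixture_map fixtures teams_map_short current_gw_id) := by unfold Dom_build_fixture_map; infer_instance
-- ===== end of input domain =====

-- B replaces A's global sort plus capped accumulating pass with a grouping pass that collects
-- (event, string) pairs per team and then sorts each team's own list and takes the first 3
-- (objective: alternative decomposition, same result).

-- ===== PORT A =====
-- loop body of A's 'for f in relevant_fixtures' (dict indexing team_fixtures[...] is ported
-- with get?/getD; Pre_ excludes the inputs where Python would raise KeyError)
def pvA_step (tm : PySem.Dict Int String) (d : PySem.Dict Int (List String)) (f : List (String × Int)) : PySem.Dict Int (List String) :=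
  let fd := PySem.Dict.ofList f
  let opp_a := tm.getD (fd.getD "team_a" 0) "?"
  let fixture_h_str := opp_a ++ "(" ++ PySem.Int.toStr (fd.getD "team_h_difficulty" 3) ++ ")"
  let opp_h := tm.getD (fd.getD "team_h" 0) "?"
  let fixture_a_str := opp_h ++ "(" ++ PySem.Int.toStr (fd.getD "team_a_difficulty" 3) ++ ")"
  let d1 := if ((d.get? (fd.getD "team_h" 0)).getD []).length < 3
            then d.insert (fd.getD "team_h" 0) (((d.get? (fd.getD "team_h" 0)).getD []) ++ [fixture_h_str]) else d
  if ((d1.get? (fd.getD "team_a" 0)).getD []).length < 3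
  then d1.insert (fd.getD "team_a" 0) (((d1.get? (fd.getD "team_a" 0)).getD []) ++ [fixture_a_str]) else d1

def build_fixture_map (fixtures : List (List (String × Int))) (teams_map_short : List (Int × String)) (current_gw_id : Int) : List (Int × String) :=
  let tm := PySem.Dict.ofList teams_map_short
  let team_fixtures : PySem.Dict Int (List String) :=
    tm.keys.foldl (fun d t => d.insert t []) PySem.Dict.empty
  let relevant_fixtures :=
    PySem.List.sorted
      (fixtures.filter (fun f => ((PySem.Dict.ofList f).getD "finished" 0 == 0) && !((PySem.Dict.ofList f).getD "event" 0 == 0)))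
      (fun f => (PySem.Dict.ofList f).getD "event" 0) false
  ((relevant_fixtures.foldl (pvA_step tm) team_fixtures).items).map (fun kv => (kv.1, PySem.Str.join ", " kv.2))

-- ===== PORT B =====
-- loop body of B's single grouping pass over 'fixtures'
def pvB_step (tm : PySem.Dict Int String) (d : PySem.Dict Int (List (Int × String))) (f : List (String × Int)) : PySem.Dict Int (List (Int × String)) :=
  let fd := PySem.Dict.ofList f
  if !(fd.getD "finished" 0 == 0) || (fd.getD "event" 0 == 0) then d
  else
    let e := fd.getD "event" 0
    let home_str := tm.getD (fd.getD "team_a" 0) "?" ++ "(" ++ PySem.Int.toStr (fd.getD "team_h_difficulty" 3) ++ ")"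
    let away_str := tm.getD (fd.getD "team_h" 0) "?" ++ "(" ++ PySem.Int.toStr (fd.getD "team_a_difficulty" 3) ++ ")"
    let d1 := d.insert (fd.getD "team_h" 0) (((d.get? (fd.getD "team_h" 0)).getD []) ++ [(e, home_str)])
    d1.insert (fd.getD "team_a" 0) (((d1.get? (fd.getD "team_a" 0)).getD []) ++ [(e, away_str)])

def build_fixture_map_alt (fixtures : List (List (String × Int))) (teams_map_short : List (Int × String)) (current_gw_id : Int) : List (Int × String) :=
  let tm := PySem.Dict.ofList teams_map_short
  let team_fixtures : PySem.Dict Int (List (Int × String)) :=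
    tm.keys.foldl (fun d t => d.insert t []) PySem.Dict.empty
  let final := fixtures.foldl (pvB_step tm) team_fixtures
  final.items.map (fun kv =>
    (kv.1, PySem.Str.join ", " (((PySem.List.sorted kv.2 (fun p => p.1) false).take 3).map (fun p => p.2))))

-- ===== PRECONDITION & SPEC =====
-- Pre_ excludes exactly the inputs where Python A raises KeyError: a relevant (unplayed,
-- truthy-event) fixture missing the "team_h"/"team_a" key, or naming a team id that is not a
-- key of teams_map_short.
def Pre_build_fixture_map (fixtures : List (List (String × Int))) (teams_map_short : List (Int × String)) (current_gw_id : Int) : Prop :=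
  ∀ f ∈ fixtures,
    ((PySem.Dict.ofList f).getD "finished" 0 = 0 ∧ (PySem.Dict.ofList f).getD "event" 0 ≠ 0) →
      ("team_h" ∈ f.map Prod.fst ∧ "team_a" ∈ f.map Prod.fst ∧
       (PySem.Dict.ofList f).getD "team_h" 0 ∈ teams_map_short.map Prod.fst ∧
       (PySem.Dict.ofList f).getD "team_a" 0 ∈ teams_map_short.map Prod.fst)
instance (fixtures : List (List (String × Int))) (teams_map_short : List (Int × String)) (current_gw_id : Int) : Decidable (Pre_build_fixture_map fixtures teams_map_short current_gw_id) := by unfold Pre_build_fixture_map; infer_instance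

def pvWitness_build_fixture_map : (List (List (String × Int))) × (List (Int × String)) × Int :=
  ([[("event", 2), ("team_h", 1), ("team_a", 2)]], [(1, "ARS"), (2, "WHU")], 2)

def Spec_build_fixture_map (fixtures : List (List (String × Int))) (teams_map_short : List (Int × String)) (current_gw_id : Int) (out : List (Int × String)) : Prop := out = build_fixture_map_alt fixtures teams_map_short current_gw_id
instance (fixtures : List (List (String × Int))) (teams_map_short : List (Int × String)) (current_gw_id : Int) (out : List (Int × String)) : Decidable (Spec_build_fixture_map fixtures teams_map_short current_gw_id out) := by unfold Spec_build_fixture_map; infer_instance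

-- ===== CLAIM (what is proved, stated in full; the proofs are below) =====
def Claim_equal_build_fixture_map : Prop := ∀ (fixtures : List (List (String × Int))) (teams_map_short : List (Int × String)) (current_gw_id : Int), Dom_build_fixture_map fixtures teams_map_short current_gw_id → Pre_build_fixture_map fixtures teams_map_short current_gw_id → Spec_build_fixture_map fixtures teams_map_short current_gw_id (build_fixture_map fixtures teams_map_short current_gw_id)

-- ===== LEMMAS AND PROOFS =====

def pvRelB (f : List (String × Int)) : Bool :=
  ((PySem.Dict.ofList f).getD "finished" 0 == 0) && !((PySem.Dict.ofList f).getD "event" 0 == 0)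
def pvKey (f : List (String × Int)) : Int := (PySem.Dict.ofList f).getD "event" 0
def pvTh (f : List (String × Int)) : Int := (PySem.Dict.ofList f).getD "team_h" 0
def pvTa (f : List (String × Int)) : Int := (PySem.Dict.ofList f).getD "team_a" 0
def pvHstr (tm : PySem.Dict Int String) (f : List (String × Int)) : String :=
  tm.getD (pvTa f) "?" ++ "(" ++ PySem.Int.toStr ((PySem.Dict.ofList f).getD "team_h_difficulty" 3) ++ ")"
def pvAstr (tm : PySem.Dict Int String) (f : List (String × Int)) : String :=
  tm.getD (pvTh f) "?" ++ "(" ++ PySem.Int.toStr ((PySem.Dict.ofList f).getD "team_a_difficulty" 3) ++ ")"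
def pvContrib (tm : PySem.Dict Int String) (t : Int) (f : List (String × Int)) : List String :=
  (if pvTh f = t then [pvHstr tm f] else []) ++ (if pvTa f = t then [pvAstr tm f] else [])
def pvContribE (tm : PySem.Dict Int String) (t : Int) (f : List (String × Int)) : List (Int × String) :=
  (if pvTh f = t then [(pvKey f, pvHstr tm f)] else []) ++ (if pvTa f = t then [(pvKey f, pvAstr tm f)] else [])


lemma pv_get?_mkmap {ν : Type} (K : List Int) (v : Int → ν) (hK : K.Nodup) {t : Int} (ht : t ∈ K) :
    (PySem.Dict.mk (K.map (fun s => (s, v s)))).get? t = some (v t) := by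
  induction K with
  | nil => cases ht
  | cons k K ih =>
    simp only [List.map_cons]
    rcases List.mem_cons.mp ht with h | h
    · subst h
      simp [PySem.Dict.get?, List.find?_cons]
    · have hk : k ≠ t := by rintro rfl; exact (List.nodup_cons.mp hK).1 h
      have := ih (List.nodup_cons.mp hK).2 h
      simp only [PySem.Dict.get?] at this ⊢
      rw [List.find?_cons_of_neg (by simpa using hk)]
      exact this

lemma pv_contains_mkmap {ν : Type} (K : List Int) (v : Int → ν) {t : Int} (ht : t ∈ K) :
    (PySem.Dict.mk (K.map (fun s => (s, v s)))).contains t = true := by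
  simp only [PySem.Dict.contains, List.any_map, List.any_eq_true]
  exact ⟨t, ht, by simp⟩

lemma pv_insert_mkmap {ν : Type} (K : List Int) (v : Int → ν) {t : Int} (ht : t ∈ K) (x : ν) :
    (PySem.Dict.mk (K.map (fun s => (s, v s)))).insert t x
      = PySem.Dict.mk (K.map (fun s => (s, if s = t then x else v s))) := by
  simp only [PySem.Dict.insert, pv_contains_mkmap K v ht, if_pos]
  congr 1
  rw [List.map_map]
  refine List.map_congr_left (fun s _ => ?_)
  by_cases h : s = t
  · subst h; simp
  · simp [h]

lemma pv_init_foldl {ν : Type} (K : List Int) (c : ν) (hK : K.Nodup) :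
    K.foldl (fun d t => d.insert t c) PySem.Dict.empty
      = PySem.Dict.mk (K.map (fun s => (s, c))) := by
  suffices h : ∀ (K : List Int) (d : PySem.Dict Int ν), (∀ t ∈ K, d.contains t = false) → K.Nodup →
      K.foldl (fun d t => d.insert t c) d = PySem.Dict.mk (d.items ++ K.map (fun s => (s, c))) by
    simpa using h K PySem.Dict.empty (by simp [PySem.Dict.contains, PySem.Dict.empty]) hK
  intro K
  induction K with
  | nil => intro d _ _; simp
  | cons k K ih =>
    intro d hd hnd
    have hins : d.insert k c = PySem.Dict.mk (d.items ++ [(k, c)]) := by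
      simp [PySem.Dict.insert, hd k (by simp)]
    simp only [List.foldl_cons, hins]
    rw [ih _ (fun t htK => ?_) (List.nodup_cons.mp hnd).2]
    · simp
    · have hne : (k == t) = false := by
        simp only [beq_eq_false_iff_ne]; rintro rfl; exact (List.nodup_cons.mp hnd).1 htK
      have h2 := hd t (by simp [htK])
      simp only [PySem.Dict.contains, List.any_append, List.any_eq_false, Bool.or_eq_false_iff] at h2 ⊢
      refine ⟨h2, ?_⟩
      simpa using hne


lemma pv_take_take_append {α : Type} (n : Nat) (A B : List α) :
    (A.take n ++ B).take n = (A ++ B).take n := by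
  induction A generalizing n B with
  | nil => simp
  | cons a A ih =>
    cases n with
    | zero => simp
    | succ n => simp [List.take_succ_cons, ih]

lemma pv_capped_append {ν : Type} (K : List Int) (hK : K.Nodup) (w : Int → List ν)
    (t0 : Int) (ht0 : t0 ∈ K) (hw : ∀ s, (w s).length ≤ 3) (x : ν) :
    (if (((PySem.Dict.mk (K.map (fun s => (s, w s)))).get? t0).getD []).length < 3
     then (PySem.Dict.mk (K.map (fun s => (s, w s)))).insert t0 ((((PySem.Dict.mk (K.map (fun s => (s, w s)))).get? t0).getD []) ++ [x])
     else (PySem.Dict.mk (K.map (fun s => (s, w s)))))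
    = PySem.Dict.mk (K.map (fun s => (s, if s = t0 then (w s ++ [x]).take 3 else w s))) := by
  rw [pv_get?_mkmap K w hK ht0]
  simp only [Option.getD_some]
  by_cases hlt : (w t0).length < 3
  · rw [if_pos hlt, pv_insert_mkmap K w ht0]
    congr 1
    refine List.map_congr_left (fun s _ => ?_)
    by_cases hs : s = t0
    · subst hs
      rw [if_pos rfl, if_pos rfl, List.take_of_length_le (by simp; omega)]
    · simp [hs]
  · rw [if_neg hlt]
    congr 1
    refine List.map_congr_left (fun s _ => ?_)
    by_cases hs : s = t0
    · subst hs
      have h3 : (w s).length = 3 := le_antisymm (hw s) (not_lt.mp hlt)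
      rw [if_pos rfl, List.take_append_of_le_length (by omega), List.take_of_length_le (by omega)]
    · simp [hs]

lemma pv_plain_append {ν : Type} (K : List Int) (hK : K.Nodup) (w : Int → List ν)
    (t0 : Int) (ht0 : t0 ∈ K) (x : ν) :
    (PySem.Dict.mk (K.map (fun s => (s, w s)))).insert t0 ((((PySem.Dict.mk (K.map (fun s => (s, w s)))).get? t0).getD []) ++ [x])
    = PySem.Dict.mk (K.map (fun s => (s, if s = t0 then w s ++ [x] else w s))) := by
  rw [pv_get?_mkmap K w hK ht0, Option.getD_some, pv_insert_mkmap K w ht0]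
  congr 1
  refine List.map_congr_left (fun s _ => ?_)
  by_cases hs : s = t0
  · subst hs; simp
  · simp [hs]

lemma pvA_step_mkmap (tm : PySem.Dict Int String) (K : List Int) (v : Int → List String)
    (hK : K.Nodup) (f : List (String × Int)) (hth : pvTh f ∈ K) (hta : pvTa f ∈ K)
    (hlen : ∀ s, (v s).length ≤ 3) :
    pvA_step tm (PySem.Dict.mk (K.map (fun s => (s, v s)))) f
      = PySem.Dict.mk (K.map (fun s => (s, (v s ++ pvContrib tm s f).take 3))) := by
  dsimp only [pvA_step]
  have eTh : (PySem.Dict.ofList f).getD "team_h" 0 = pvTh f := rfl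
  have eTa : (PySem.Dict.ofList f).getD "team_a" 0 = pvTa f := rfl
  rw [eTh, eTa]
  rw [pv_capped_append K hK v _ hth hlen]
  rw [pv_capped_append K hK _ _ hta (by intro s; by_cases hs : s = pvTh f <;> simp [hs, hlen s])]
  have eH : tm.getD (pvTa f) "?" ++ "(" ++ PySem.Int.toStr ((PySem.Dict.ofList f).getD "team_h_difficulty" 3) ++ ")" = pvHstr tm f := rfl
  have eA : tm.getD (pvTh f) "?" ++ "(" ++ PySem.Int.toStr ((PySem.Dict.ofList f).getD "team_a_difficulty" 3) ++ ")" = pvAstr tm f := rfl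
  rw [eH, eA]
  congr 1
  refine List.map_congr_left (fun s _ => ?_)
  have hPC : pvContrib tm s f
      = (if pvTh f = s then [pvHstr tm f] else []) ++ (if pvTa f = s then [pvAstr tm f] else []) := rfl
  rw [hPC]
  by_cases h1 : s = pvTh f <;> by_cases h2 : s = pvTa f
  · rw [if_pos h2, if_pos h1, if_pos h1.symm, if_pos h2.symm, pv_take_take_append, List.append_assoc]
  · rw [if_neg h2, if_pos h1, if_pos h1.symm, if_neg (fun hh : pvTa f = s => h2 hh.symm)]
    simp
  · rw [if_pos h2, if_neg h1, if_neg (fun hh : pvTh f = s => h1 hh.symm), if_pos h2.symm]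
    simp
  · rw [if_neg h2, if_neg h1, if_neg (fun hh : pvTh f = s => h1 hh.symm), if_neg (fun hh : pvTa f = s => h2 hh.symm)]
    simp [List.take_of_length_le (hlen s)]

lemma pvB_step_mkmap (tm : PySem.Dict Int String) (K : List Int) (v : Int → List (Int × String))
    (hK : K.Nodup) (f : List (String × Int)) (hmem : pvRelB f = true → pvTh f ∈ K ∧ pvTa f ∈ K) :
    pvB_step tm (PySem.Dict.mk (K.map (fun s => (s, v s)))) f
      = PySem.Dict.mk (K.map (fun s => (s, v s ++ if pvRelB f then pvContribE tm s f else []))) := by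
  have hcond : (!((PySem.Dict.ofList f).getD "finished" 0 == 0) || ((PySem.Dict.ofList f).getD "event" 0 == 0)) = !pvRelB f := by
    simp [pvRelB, Bool.not_and]
  dsimp only [pvB_step]
  rw [hcond]
  by_cases hrel : pvRelB f = true
  · rw [hrel]
    simp only [Bool.not_true, Bool.false_eq_true, if_false]
    obtain ⟨hth, hta⟩ := hmem hrel
    have eTh : (PySem.Dict.ofList f).getD "team_h" 0 = pvTh f := rfl
    have eTa : (PySem.Dict.ofList f).getD "team_a" 0 = pvTa f := rfl
    have eEv : (PySem.Dict.ofList f).getD "event" 0 = pvKey f := rfl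
    rw [eTh, eTa, eEv]
    rw [pv_plain_append K hK v _ hth, pv_plain_append K hK _ _ hta]
    have eH : tm.getD (pvTa f) "?" ++ "(" ++ PySem.Int.toStr ((PySem.Dict.ofList f).getD "team_h_difficulty" 3) ++ ")" = pvHstr tm f := rfl
    have eA : tm.getD (pvTh f) "?" ++ "(" ++ PySem.Int.toStr ((PySem.Dict.ofList f).getD "team_a_difficulty" 3) ++ ")" = pvAstr tm f := rfl
    rw [eH, eA]
    congr 1
    refine List.map_congr_left (fun s _ => ?_)
    simp only [if_true]
    have hPC : pvContribE tm s f
        = (if pvTh f = s then [(pvKey f, pvHstr tm f)] else []) ++ (if pvTa f = s then [(pvKey f, pvAstr tm f)] else []) := rfl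
    rw [hPC]
    by_cases h1 : s = pvTh f <;> by_cases h2 : s = pvTa f
    · rw [if_pos h2, if_pos h1, if_pos h1.symm, if_pos h2.symm, List.append_assoc]
    · rw [if_neg h2, if_pos h1, if_pos h1.symm, if_neg (fun hh : pvTa f = s => h2 hh.symm)]
      simp
    · rw [if_pos h2, if_neg h1, if_neg (fun hh : pvTh f = s => h1 hh.symm), if_pos h2.symm]
      simp
    · rw [if_neg h2, if_neg h1, if_neg (fun hh : pvTh f = s => h1 hh.symm), if_neg (fun hh : pvTa f = s => h2 hh.symm)]
      simp
  · have hrel' : pvRelB f = false := by simpa using hrel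
    rw [hrel']
    simp only [Bool.not_false, if_true]
    congr 1
    refine List.map_congr_left (fun s _ => ?_)
    simp [hrel']


lemma pvA_fold (tm : PySem.Dict Int String) (K : List Int) (hK : K.Nodup)
    (rs : List (List (String × Int))) (hmem : ∀ f ∈ rs, pvTh f ∈ K ∧ pvTa f ∈ K)
    (v : Int → List String) (hlen : ∀ s, (v s).length ≤ 3) :
    rs.foldl (pvA_step tm) (PySem.Dict.mk (K.map (fun s => (s, v s))))
      = PySem.Dict.mk (K.map (fun s => (s, (v s ++ rs.flatMap (fun f => pvContrib tm s f)).take 3))) := by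
  revert hmem hlen
  induction rs generalizing v with
  | nil =>
    intro _ hlen
    simp only [List.foldl_nil, List.flatMap_nil, List.append_nil]
    congr 1
    exact List.map_congr_left (fun s _ => by rw [List.take_of_length_le (hlen s)])
  | cons f rs ih =>
    intro hmem hlen
    simp only [List.foldl_cons]
    rw [pvA_step_mkmap tm K v hK f (hmem f (by simp)).1 (hmem f (by simp)).2 hlen]
    rw [ih _ (fun g hg => hmem g (by simp [hg])) (fun s => by rw [List.length_take]; omega)]
    congr 1
    refine List.map_congr_left (fun s _ => ?_)
    rw [pv_take_take_append, List.flatMap_cons, List.append_assoc]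

lemma pvB_fold (tm : PySem.Dict Int String) (K : List Int) (hK : K.Nodup)
    (rs : List (List (String × Int))) (hmem : ∀ f ∈ rs, pvRelB f = true → pvTh f ∈ K ∧ pvTa f ∈ K)
    (v : Int → List (Int × String)) :
    rs.foldl (pvB_step tm) (PySem.Dict.mk (K.map (fun s => (s, v s))))
      = PySem.Dict.mk (K.map (fun s => (s, v s ++ (rs.filter pvRelB).flatMap (fun f => pvContribE tm s f)))) := by
  revert hmem
  induction rs generalizing v with
  | nil => intro _; simp
  | cons f rs ih =>
    intro hmem
    simp only [List.foldl_cons]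
    rw [pvB_step_mkmap tm K v hK f (hmem f (by simp))]
    rw [ih _ (fun g hg rel => hmem g (by simp [hg]) rel)]
    congr 1
    refine List.map_congr_left (fun s _ => ?_)
    by_cases hrel : pvRelB f = true <;> simp [hrel, List.filter_cons, List.append_assoc]

lemma pv_insertBy_middle {β : Type} (before : β → β → Bool) (b : β) (U V : List β)
    (hU : ∀ c ∈ U, before b c = false) (hV : ∀ c ∈ V, before b c = true) :
    PySem.List.insertBy before b (U ++ V) = U ++ b :: V := by
  induction U with
  | nil =>
    cases V with
    | nil => simp [PySem.List.insertBy]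
    | cons v V => simp [PySem.List.insertBy, hV v (by simp)]
  | cons u U ih =>
    have hu : before b u = false := hU u (by simp)
    simp [PySem.List.insertBy, hu, ih (fun c hc => hU c (by simp [hc]))]

lemma pv_foldl_insert_block {β : Type} (tag : β → Int) (t : Int) (L U V : List β)
    (hL : ∀ b ∈ L, tag b = t) (hU : ∀ c ∈ U, tag c ≤ t) (hV : ∀ c ∈ V, t < tag c) :
    L.foldl (fun acc b => PySem.List.insertBy (fun p q => decide (tag p < tag q)) b acc) (U ++ V)
      = U ++ L ++ V := by
  revert hU hL
  induction L generalizing U with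
  | nil => intro _ _; simp
  | cons x xs ih =>
    intro hL hU
    simp only [List.foldl_cons]
    rw [pv_insertBy_middle _ x U V
      (fun y hy => by rw [hL x (by simp)]; exact decide_eq_false (not_lt.mpr (hU y hy)))
      (fun y hy => by rw [hL x (by simp)]; exact decide_eq_true (hV y hy))]
    have e : U ++ x :: V = (U ++ [x]) ++ V := by simp
    rw [e, ih (U ++ [x])
      (fun y hy => hL y (by simp [hy]))
      (fun y hy => by
        rcases List.mem_append.mp hy with h | h
        · exact hU y h
        · simp only [List.mem_singleton] at h
          exact le_of_eq (by rw [h]; exact hL x (by simp)))]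
    simp

lemma pv_dropWhile_gt {α : Type} (key : α → Int) (a : α) (Z : List α)
    (hZ : Z.Pairwise (fun p q => key p ≤ key q)) :
    ∀ c ∈ Z.dropWhile (fun z => decide (key z ≤ key a)), key a < key c := by
  induction Z with
  | nil => simp
  | cons z Z ih =>
    rcases List.pairwise_cons.mp hZ with ⟨hz, hZ'⟩
    by_cases h : key z ≤ key a
    · rw [List.dropWhile_cons_of_pos (by simpa using h)]
      exact ih hZ'
    · rw [List.dropWhile_cons_of_neg (by simpa using h)]
      intro c hc
      rcases List.mem_cons.mp hc with rfl | hc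
      · exact not_le.mp h
      · exact lt_of_lt_of_le (not_le.mp h) (hz c hc)

lemma pv_sorted_flatMap {α β : Type} (key : α → Int) (tag : β → Int) (g : α → List β)
    (xs : List α) (h : ∀ a ∈ xs, ∀ b ∈ g a, tag b = key a) :
    PySem.List.sorted (xs.flatMap g) tag false
      = (PySem.List.sorted xs key false).flatMap g := by
  induction xs using List.reverseRecOn with
  | nil => simp [PySem.List.sorted]
  | append_singleton xs a ih =>
    have hxs : ∀ a' ∈ xs, ∀ b ∈ g a', tag b = key a' := fun a' ha' => h a' (by simp [ha'])
    have ha : ∀ b ∈ g a, tag b = key a := h a (by simp)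
    have hL : PySem.List.sorted ((xs ++ [a]).flatMap g) tag false
        = (g a).foldl (fun acc b => PySem.List.insertBy (fun p q => decide (tag p < tag q)) b acc)
            (PySem.List.sorted (xs.flatMap g) tag false) := by
      rw [List.flatMap_append, PySem.List.sorted_eq_foldl_insertBy, List.foldl_append,
        ← PySem.List.sorted_eq_foldl_insertBy]
      simp
    have hsortedapp : PySem.List.sorted (xs ++ [a]) key false
        = PySem.List.insertBy (fun p q => decide (key p < key q)) a (PySem.List.sorted xs key false) := by
      rw [PySem.List.sorted_eq_foldl_insertBy, List.foldl_append, ← PySem.List.sorted_eq_foldl_insertBy]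
      simp
    have hpair : (PySem.List.sorted xs key false).Pairwise (fun p q => key p ≤ key q) :=
      PySem.List.sorted_pairwise xs key
    have hUV : (PySem.List.sorted xs key false).takeWhile (fun z => decide (key z ≤ key a))
        ++ (PySem.List.sorted xs key false).dropWhile (fun z => decide (key z ≤ key a))
        = PySem.List.sorted xs key false := List.takeWhile_append_dropWhile
    have hUle : ∀ c ∈ (PySem.List.sorted xs key false).takeWhile (fun z => decide (key z ≤ key a)),
        key c ≤ key a := fun c hc => by simpa using List.mem_takeWhile_imp hc
    have hVgt : ∀ c ∈ (PySem.List.sorted xs key false).dropWhile (fun z => decide (key z ≤ key a)),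
        key a < key c := pv_dropWhile_gt key a _ hpair
    have hmemU : ∀ u ∈ (PySem.List.sorted xs key false).takeWhile (fun z => decide (key z ≤ key a)), u ∈ xs := by
      intro u hu
      exact (PySem.List.mem_sorted xs key false u).mp (hUV ▸ List.mem_append.mpr (Or.inl hu))
    have hmemV : ∀ u ∈ (PySem.List.sorted xs key false).dropWhile (fun z => decide (key z ≤ key a)), u ∈ xs := by
      intro u hu
      exact (PySem.List.mem_sorted xs key false u).mp (hUV ▸ List.mem_append.mpr (Or.inr hu))
    have hins : PySem.List.insertBy (fun p q => decide (key p < key q)) a (PySem.List.sorted xs key false)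
        = (PySem.List.sorted xs key false).takeWhile (fun z => decide (key z ≤ key a))
          ++ a :: (PySem.List.sorted xs key false).dropWhile (fun z => decide (key z ≤ key a)) := by
      conv_lhs => rw [← hUV]
      exact pv_insertBy_middle _ a _ _
        (fun c hc => decide_eq_false (not_lt.mpr (hUle c hc)))
        (fun c hc => decide_eq_true (hVgt c hc))
    rw [hL, ih hxs, hsortedapp, hins]
    conv_lhs => rw [← hUV]
    rw [List.flatMap_append]
    rw [pv_foldl_insert_block tag (key a) (g a) _ _ ha
      (fun c hc => by
        rcases List.mem_flatMap.mp hc with ⟨u, hu, hcu⟩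
        rw [hxs u (hmemU u hu) c hcu]; exact hUle u hu)
      (fun c hc => by
        rcases List.mem_flatMap.mp hc with ⟨u, hu, hcu⟩
        rw [hxs u (hmemV u hu) c hcu]; exact hVgt u hu)]
    rw [List.flatMap_append, List.flatMap_cons]
    simp [List.append_assoc]


-- tags of a team's contributions are the fixture's event
lemma pv_contribE_fst (tm : PySem.Dict Int String) (s : Int) (a : List (String × Int)) :
    ∀ b ∈ pvContribE tm s a, b.1 = pvKey a := by
  intro b hb
  simp only [pvContribE, List.mem_append] at hb
  rcases hb with hb | hb <;> split_ifs at hb <;> simp_all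

lemma pv_contribE_snd (tm : PySem.Dict Int String) (s : Int) (f : List (String × Int)) :
    (pvContribE tm s f).map (fun p => p.2) = pvContrib tm s f := by
  by_cases h1 : pvTh f = s <;> by_cases h2 : pvTa f = s <;>
    simp [pvContribE, pvContrib, h1, h2]

lemma pv_main (fixtures : List (List (String × Int))) (teams_map_short : List (Int × String)) (current_gw_id : Int)
    (hPre : Pre_build_fixture_map fixtures teams_map_short current_gw_id) :
    build_fixture_map fixtures teams_map_short current_gw_id
      = build_fixture_map_alt fixtures teams_map_short current_gw_id := by
  dsimp only [build_fixture_map, build_fixture_map_alt]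
  set tm := (PySem.Dict.ofList teams_map_short : PySem.Dict Int String) with htm
  have hkeys : tm.keys = PySem.Set.ofList (teams_map_short.map Prod.fst) := by
    rw [htm]
    show (List.foldl (fun d x => d.insert x.1 x.2) PySem.Dict.empty teams_map_short).keys = _
    rw [PySem.Dict.keys_foldl_insert_key teams_map_short Prod.fst (fun _ x => x.2) PySem.Dict.empty]
    rw [show (PySem.Dict.empty : PySem.Dict Int String).keys = [] from rfl, PySem.Set.update_nil_left]
  set K := tm.keys with hKdef
  have hKnodup : K.Nodup := by rw [hkeys]; exact PySem.Set.nodup_ofList _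
  have hKmem : ∀ x : Int, x ∈ teams_map_short.map Prod.fst → x ∈ K := by
    intro x hx; rw [hkeys]; exact (PySem.Set.mem_ofList _ _).mpr hx
  have eRel : (fun f : List (String × Int) =>
      ((PySem.Dict.ofList f).getD "finished" 0 == 0) && !((PySem.Dict.ofList f).getD "event" 0 == 0)) = pvRelB := rfl
  have eKey : (fun f : List (String × Int) => (PySem.Dict.ofList f).getD "event" 0) = pvKey := rfl
  rw [eRel, eKey]
  have hRelMem : ∀ f, f ∈ fixtures.filter pvRelB → pvTh f ∈ K ∧ pvTa f ∈ K := by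
    intro f hf
    rcases List.mem_filter.mp hf with ⟨hfx, hrel⟩
    have hc : (PySem.Dict.ofList f).getD "finished" 0 = 0 ∧ (PySem.Dict.ofList f).getD "event" 0 ≠ 0 := by
      simp only [pvRelB, Bool.and_eq_true, beq_iff_eq, Bool.not_eq_true', beq_eq_false_iff_ne] at hrel
      exact hrel
    obtain ⟨_, _, h1, h2⟩ := hPre f hfx hc
    exact ⟨hKmem _ h1, hKmem _ h2⟩
  have hmemA : ∀ f ∈ PySem.List.sorted (fixtures.filter pvRelB) pvKey false, pvTh f ∈ K ∧ pvTa f ∈ K :=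
    fun f hf => hRelMem f ((PySem.List.mem_sorted _ _ _ f).mp hf)
  have hmemB : ∀ f ∈ fixtures, pvRelB f = true → pvTh f ∈ K ∧ pvTa f ∈ K :=
    fun f hf hrel => hRelMem f (List.mem_filter.mpr ⟨hf, hrel⟩)
  rw [pv_init_foldl K ([] : List String) hKnodup,
      pv_init_foldl K ([] : List (Int × String)) hKnodup]
  rw [pvA_fold tm K hKnodup _ hmemA (fun _ => []) (fun s => by simp)]
  rw [pvB_fold tm K hKnodup fixtures hmemB (fun _ => [])]
  simp only [List.map_map]
  refine List.map_congr_left (fun s _ => ?_)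
  simp only [Function.comp_apply, List.nil_append]
  congr 1
  rw [pv_sorted_flatMap pvKey (fun p => p.1) (fun f => pvContribE tm s f)
        (fixtures.filter pvRelB) (fun a _ => pv_contribE_fst tm s a)]
  rw [List.map_take, List.map_flatMap]
  simp only [pv_contribE_snd]

-- ===== VERDICT (by name: the statement is the Claim_ definition above) =====
theorem build_fixture_map_spec : Claim_equal_build_fixture_map := by
  intro fixtures teams_map_short current_gw_id _hDom hPre
  unfold Spec_build_fixture_map
  exact pv_main fixtures teams_map_short current_gw_id hPre
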